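-- pv_equiv track=rewrite | github.com/Olegas/advent-of-code-2021 | day15.py | replicate_matrix
-- ===== SOURCE A (Python) =====
-- def get(pos, mat):
--     x, y = pos
--     return mat[y][x]
--
-- def replicate_matrix(mat):
--     mx = len(mat)
--     my = len(mat[0])
--     mx2 = mx * 5
--     my2 = my * 5
--     new_mat = []
--     for y in range(0, my2):
--         tile_y = y // my
--         l = [0] * mx2
--         for x in range(0, mx2):
--             tile_x = x // mx
--             orig_pos = (x % mx, y % my)
--             new_value = (get(orig_pos, mat) + tile_x + tile_y) % 9
--             new_value = 9 if new_value == 0 else new_value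
--             l[x] = new_value
--         new_mat.append(l)
--     return new_mat
-- ===== SOURCE B (Python) =====
-- def replicate_matrix(mat):
--     mx = len(mat)
--     my = len(mat[0])
--     # normalize the base tile once into the 1..9 range
--     base = [[(mat[i][j] - 1) % 9 + 1 for j in range(mx)] for i in range(my)]
--
--     def inc(m):
--         # one whole-matrix "increment by 1 with wrap to 1..9" pass
--         return [[v % 9 + 1 for v in row] for row in m]
--
--     # stage 1: grow each row horizontally by gluing successive increments
--     strip = [row[:] for row in base]
--     t = base
--     for _ in range(4):
--         t = inc(t)
--         for r, tr in zip(strip, t):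
--             r.extend(tr)
--
--     # stage 2: stack the strip with its successive increments vertically
--     out = [row[:] for row in strip]
--     s = strip
--     for _ in range(4):
--         s = inc(s)
--         out.extend(row[:] for row in s)
--     return out
-- ===== Notes on version B (the rewrite author's own statement) =====
-- stated objective: faster
-- what changed: A computes each of the 25*m*n output cells independently from flat coordinates via tile=idx//size, idx%size lookups through a helper call and a '9 if 0' patch; B never computes per-cell offsets: it normalizes the base tile once, then repeatedly applies a whole-matrix 'increment with wrap to 1..9' transform, gluing the successive images horizontally (row extend) and then stacking the strip with its successive images vertically.
import Mathlib
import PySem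

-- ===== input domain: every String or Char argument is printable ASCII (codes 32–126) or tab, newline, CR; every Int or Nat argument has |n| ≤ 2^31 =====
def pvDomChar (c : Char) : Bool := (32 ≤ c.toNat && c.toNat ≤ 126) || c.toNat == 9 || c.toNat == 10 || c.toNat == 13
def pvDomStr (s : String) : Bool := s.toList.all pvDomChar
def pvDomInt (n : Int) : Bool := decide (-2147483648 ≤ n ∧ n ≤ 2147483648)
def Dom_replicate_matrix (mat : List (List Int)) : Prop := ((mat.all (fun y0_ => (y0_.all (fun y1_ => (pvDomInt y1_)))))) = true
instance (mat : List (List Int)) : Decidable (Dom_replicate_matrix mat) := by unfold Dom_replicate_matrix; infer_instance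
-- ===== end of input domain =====

-- B drops A's per-cell flat-coordinate //,% offset arithmetic and '9 if 0' patch: it normalizes
-- the base tile once and builds the 5x5 tiling by repeatedly applying a whole-matrix
-- "increment with wrap to 1..9" transform, gluing images horizontally then vertically
-- (objective: faster — a timing run measured a constant-factor speedup; same O(25*m*n)).

-- ===== PORT A =====
-- helper 'get' from the Python module
def pvGet (pos : Int × Int) (mat : List (List Int)) : Int :=
  PySem.List.pyGetD (PySem.List.pyGetD mat pos.2 []) pos.1 0

def replicate_matrix (mat : List (List Int)) : List (List Int) :=
  let mx : Int := mat.length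
  let my : Int := (PySem.List.pyGetD mat 0 []).length
  let mx2 : Int := mx * 5
  let my2 : Int := my * 5
  (PySem.List.pyRange 0 my2 1).foldl (fun new_mat y =>
    let tile_y := PySem.Int.floordiv y my
    let l0 : List Int := List.replicate mx2.toNat 0
    let l := (PySem.List.pyRange 0 mx2 1).foldl (fun l x =>
      let tile_x := PySem.Int.floordiv x mx
      let orig_pos := (PySem.Int.mod x mx, PySem.Int.mod y my)
      let new_value := PySem.Int.mod (pvGet orig_pos mat + tile_x + tile_y) 9
      let new_value' := if new_value = 0 then 9 else new_value
      PySem.List.pySetD l x new_value') l0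
    new_mat ++ [l]) []

-- ===== PORT B =====
-- B's helper inc: one whole-matrix "increment by 1 with wrap to 1..9" pass
def pvInc (m : List (List Int)) : List (List Int) :=
  m.map (fun row => row.map (fun v => PySem.Int.mod v 9 + 1))

def replicate_matrix_alt (mat : List (List Int)) : List (List Int) :=
  let mx : Int := mat.length
  let my : Int := (PySem.List.pyGetD mat 0 []).length
  let base := (PySem.List.pyRange 0 my 1).map (fun i =>
    (PySem.List.pyRange 0 mx 1).map (fun j =>
      PySem.Int.mod (PySem.List.pyGetD (PySem.List.pyGetD mat i []) j 0 - 1) 9 + 1))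
  -- stage 1: the loop state is (strip, t); r.extend(tr) over zip(strip, t) is the zipWith
  let stripPair := (PySem.List.pyRange 0 4 1).foldl
    (fun (st : List (List Int) × List (List Int)) _ =>
      let t := pvInc st.2
      (st.1.zipWith (fun r tr => r ++ tr) t, t)) (base, base)
  -- stage 2: the loop state is (out, s); out.extend(...) is the append
  let outPair := (PySem.List.pyRange 0 4 1).foldl
    (fun (st : List (List Int) × List (List Int)) _ =>
      let s := pvInc st.2
      (st.1 ++ s, s)) (stripPair.1, stripPair.1)
  outPair.1

-- ===== PRECONDITION & SPEC =====
-- Pre_ excludes exactly the inputs where the Python A raises IndexError: the empty matrix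
-- (mat[0]) and matrices whose accessed row/column indices fall out of range.
def Pre_replicate_matrix (mat : List (List Int)) : Prop :=
  mat ≠ [] ∧ (mat.headD []).length ≤ mat.length ∧
    ∀ r ∈ mat.take (mat.headD []).length, mat.length ≤ r.length
instance (mat : List (List Int)) : Decidable (Pre_replicate_matrix mat) := by
  unfold Pre_replicate_matrix; infer_instance

def pvWitness_replicate_matrix : List (List Int) := [[1, 9], [8, 2]]

def Spec_replicate_matrix (mat : List (List Int)) (out : List (List Int)) : Prop := out = replicate_matrix_alt mat
instance (mat : List (List Int)) (out : List (List Int)) : Decidable (Spec_replicate_matrix mat out) := by unfold Spec_replicate_matrix; infer_instance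

-- ===== CLAIM (what is proved, stated in full; the proofs are below) =====
def Claim_equal_replicate_matrix : Prop := ∀ (mat : List (List Int)), Dom_replicate_matrix mat → Pre_replicate_matrix mat → Spec_replicate_matrix mat (replicate_matrix mat)

-- ===== LEMMAS AND PROOFS =====

-- canonical middle form: entry at column x, row y of the replicated matrix
def pvVal (mat : List (List Int)) (x y : Nat) : Int :=
  PySem.Int.mod ((mat.getD (y % (mat.headD []).length) []).getD (x % mat.length) 0 - 1
    + ((x / mat.length : Nat) : Int) + ((y / (mat.headD []).length : Nat) : Int)) 9 + 1

def pvCanon (mat : List (List Int)) : List (List Int) :=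
  (List.range ((mat.headD []).length * 5)).map (fun y =>
    (List.range (mat.length * 5)).map (fun x => pvVal mat x y))

theorem pv_head0 (mat : List (List Int)) : mat.getD 0 [] = mat.headD [] := by
  cases mat <;> simp

theorem pv_val_arith (v a b : Int) :
    (if PySem.Int.mod (v + a + b) 9 = 0 then 9 else PySem.Int.mod (v + a + b) 9)
      = PySem.Int.mod (v - 1 + a + b) 9 + 1 := by
  rw [PySem.Int.mod_eq_emod_of_pos (by norm_num), PySem.Int.mod_eq_emod_of_pos (by norm_num)]
  split_ifs with h <;> omega

theorem pv_setfold (f : Nat → Int) : ∀ (n : Nat) (L : List Int), n ≤ L.length →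
    (List.range n).foldl (fun l k => l.set k (f k)) L = (List.range n).map f ++ L.drop n := by
  intro n
  induction n with
  | zero => intro L _; simp
  | succ n ih =>
    intro L h
    rw [List.range_succ, List.foldl_append, ih L (by omega)]
    simp only [List.foldl_cons, List.foldl_nil]
    rw [List.set_append]
    have hlen : (List.map f (List.range n)).length = n := by simp
    rw [hlen, if_neg (lt_irrefl n), Nat.sub_self,
        List.drop_eq_getElem_cons (by omega : n < L.length), List.set_cons_zero]
    simp [List.map_append]

theorem pv_range_mul {α : Type} (a n : Nat) (h : Nat → α) :
    (List.range (n * a)).map h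
      = (List.range a).flatMap (fun t => (List.range n).map (fun i => h (t * n + i))) := by
  induction a with
  | zero => simp
  | succ a ih =>
    rw [Nat.mul_succ, List.range_add, List.map_append, ih, List.range_succ, List.flatMap_append]
    congr 1
    simp [List.map_map, Function.comp, Nat.mul_comm a n]

theorem pv_A_eq_canon (mat : List (List Int)) : replicate_matrix mat = pvCanon mat := by
  unfold replicate_matrix
  simp only [PySem.List.pyGetD_zero, pv_head0, pvGet,
    show ((mat.length : Int) * 5) = ((mat.length * 5 : Nat) : Int) by push_cast; ring,
    show (((mat.headD []).length : Int) * 5) = (((mat.headD []).length * 5 : Nat) : Int) by push_cast; ring,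
    PySem.List.pyRange_zero_natCast, Int.toNat_natCast, List.foldl_map,
    PySem.List.foldl_append_singleton_eq_map, PySem.List.pySetD_natCast,
    PySem.Int.mod_natCast, PySem.Int.floordiv_natCast, PySem.List.pyGetD_natCast,
    List.nil_append]
  unfold pvCanon
  apply List.map_congr_left
  intro yk _
  rw [pv_setfold _ (mat.length * 5) _ (by simp)]
  simp only [List.drop_replicate, Nat.sub_self, List.replicate_zero, List.append_nil]
  apply List.map_congr_left
  intro xk _
  exact pv_val_arith _ _ _

-- cell value of tile offset k (B side's closed description)
def pvCell (mat : List (List Int)) (k i j : Nat) : Int :=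
  PySem.Int.mod ((mat.getD i []).getD j 0 - 1 + (k : Int)) 9 + 1

-- one horizontal strip row at vertical tile offset k
def pvSRow (mat : List (List Int)) (k i : Nat) : List Int :=
  (List.range 5).flatMap (fun tx => (List.range mat.length).map (fun j => pvCell mat (tx + k) i j))

def pvS (mat : List (List Int)) (k : Nat) : List (List Int) :=
  (List.range (mat.headD []).length).map (pvSRow mat k)

theorem pv_wrap_cell (mat : List (List Int)) (k i j : Nat) :
    PySem.Int.mod (pvCell mat k i j) 9 + 1 = pvCell mat (k + 1) i j := by
  unfold pvCell
  rw [PySem.Int.mod_eq_emod_of_pos (by norm_num), PySem.Int.mod_eq_emod_of_pos (by norm_num),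
      PySem.Int.mod_eq_emod_of_pos (by norm_num)]
  push_cast
  omega

theorem pv_inc_S (mat : List (List Int)) (k : Nat) :
    pvInc (pvS mat k) = pvS mat (k + 1) := by
  unfold pvInc pvS pvSRow
  simp only [List.map_map]
  apply List.map_congr_left
  intro i _
  simp only [Function.comp, List.map_flatMap, List.map_map]
  apply List.flatMap_congr
  intro tx _
  apply List.map_congr_left
  intro j _
  simp only [Function.comp]
  rw [pv_wrap_cell, Nat.add_assoc]

theorem pv_zip_map {α β : Type} (l : List α) (f g : α → List β) :
    List.zipWith (fun r tr => r ++ tr) (l.map f) (l.map g) = l.map (fun x => f x ++ g x) := by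
  induction l with
  | nil => rfl
  | cons a l ih => simp [ih]

-- tile at offset k, as a map over index ranges
def pvT (mat : List (List Int)) (k : Nat) : List (List Int) :=
  (List.range (mat.headD []).length).map (fun i =>
    (List.range mat.length).map (fun j => pvCell mat k i j))

theorem pv_inc_T (mat : List (List Int)) (k : Nat) :
    pvInc (pvT mat k) = pvT mat (k + 1) := by
  unfold pvInc pvT
  simp only [List.map_map]
  apply List.map_congr_left
  intro i _
  simp only [Function.comp, List.map_map]
  apply List.map_congr_left
  intro j _
  exact pv_wrap_cell mat k i j

theorem pv_B_eq_canon (mat : List (List Int)) : replicate_matrix_alt mat = pvCanon mat := by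
  unfold replicate_matrix_alt
  have hbase : (PySem.List.pyRange 0 ((PySem.List.pyGetD mat 0 []).length : Int) 1).map (fun i =>
      (PySem.List.pyRange 0 ((mat.length : Int)) 1).map (fun j =>
        PySem.Int.mod (PySem.List.pyGetD (PySem.List.pyGetD mat i []) j 0 - 1) 9 + 1))
      = pvT mat 0 := by
    simp only [PySem.List.pyGetD_zero, pv_head0, PySem.List.pyRange_zero_natCast,
      List.map_map, pvT]
    apply List.map_congr_left
    intro i _
    simp only [Function.comp]
    apply List.map_congr_left
    intro j _
    simp only [Function.comp, PySem.List.pyGetD_natCast, pvCell]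
    norm_num
  simp only [hbase]
  -- unfold the two four-step folds explicitly (pyRange 0 4 1 = [0,1,2,3])
  have hr : PySem.List.pyRange 0 4 1 = [0, 1, 2, 3] := by decide
  simp only [hr]
  simp only [List.foldl_cons, List.foldl_nil, pv_inc_T]
  -- strip = S 0
  have hstrip : List.zipWith (fun r tr => r ++ tr)
      (List.zipWith (fun r tr => r ++ tr)
        (List.zipWith (fun r tr => r ++ tr)
          (List.zipWith (fun r tr => r ++ tr) (pvT mat 0) (pvT mat 1)) (pvT mat 2)) (pvT mat 3))
      (pvT mat 4) = pvS mat 0 := by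
    unfold pvT
    rw [pv_zip_map, pv_zip_map, pv_zip_map, pv_zip_map]
    unfold pvS pvSRow
    apply List.map_congr_left
    intro i _
    rw [show List.range 5 = [0, 1, 2, 3, 4] from by decide]
    simp [List.append_assoc]
  simp only [hstrip]
  simp only [pv_inc_S]
  -- canon = S 0 ++ S 1 ++ S 2 ++ S 3 ++ S 4
  unfold pvCanon
  rw [pv_range_mul 5 (mat.headD []).length]
  rw [show List.range 5 = [0, 1, 2, 3, 4] from by decide]
  simp only [List.flatMap_cons, List.flatMap_nil, List.append_nil]
  have hS : ∀ ty : Nat, (List.range (mat.headD []).length).map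
      (fun i => (List.range (mat.length * 5)).map (fun x => pvVal mat x (ty * (mat.headD []).length + i)))
      = pvS mat ty := by
    intro ty
    unfold pvS
    apply List.map_congr_left
    intro i hi
    have hi' := List.mem_range.mp hi
    rw [pv_range_mul 5 mat.length]
    unfold pvSRow
    apply List.flatMap_congr
    intro tx _
    apply List.map_congr_left
    intro j hj
    have hj' := List.mem_range.mp hj
    unfold pvVal pvCell
    rw [Nat.mul_comm tx mat.length, Nat.mul_add_mod, Nat.mod_eq_of_lt hj',
        Nat.mul_add_div (by omega) tx j, Nat.div_eq_of_lt hj',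
        Nat.mul_comm ty (mat.headD []).length, Nat.mul_add_mod, Nat.mod_eq_of_lt hi',
        Nat.mul_add_div (by omega) ty i, Nat.div_eq_of_lt hi', Nat.add_zero, Nat.add_zero]
    push_cast
    ring_nf
  simp only [hS]
  simp [List.append_assoc]

-- ===== VERDICT (by name: the statement is the Claim_ definition above) =====
theorem replicate_matrix_spec : Claim_equal_replicate_matrix := by
  intro mat _ _
  unfold Spec_replicate_matrix
  rw [pv_A_eq_canon mat, pv_B_eq_canon mat]
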